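-- pv_equiv track=rewrite | github.com/Kar98/MicrobiologyTemp | validators/json_validator.py | getCommonKeys
-- ===== SOURCE A (Python) =====
-- def getCommonKeys(listOfDicts):
-- 	retList = []
-- 	# Get the first dictionary
-- 	check = listOfDicts[0].keys()
-- 	# For each key
-- 	for c in check:
-- 		exists = True
-- 		for dic in listOfDicts:
-- 			# If the key exists in all other dictionaries, then add to return list
-- 			try:
-- 				dic[c]
-- 			except:
-- 				exists = False
-- 		if(exists):
-- 			retList.append(c)
-- 	return retList
-- ===== SOURCE B (Python) =====
-- def getCommonKeys(listOfDicts):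
--     common = set(listOfDicts[0])
--     for dic in listOfDicts[1:]:
--         common &= set(dic)
--     return [k for k in listOfDicts[0] if k in common]
-- ===== Notes on version B (the rewrite author's own statement) =====
-- stated objective: faster
-- what changed: B maintains one running intersection of key sets across the dicts and then keeps the first dict's keys in order with a single membership pass, instead of A's per-key inner scan over all dicts with try/except lookups.
import Mathlib
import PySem

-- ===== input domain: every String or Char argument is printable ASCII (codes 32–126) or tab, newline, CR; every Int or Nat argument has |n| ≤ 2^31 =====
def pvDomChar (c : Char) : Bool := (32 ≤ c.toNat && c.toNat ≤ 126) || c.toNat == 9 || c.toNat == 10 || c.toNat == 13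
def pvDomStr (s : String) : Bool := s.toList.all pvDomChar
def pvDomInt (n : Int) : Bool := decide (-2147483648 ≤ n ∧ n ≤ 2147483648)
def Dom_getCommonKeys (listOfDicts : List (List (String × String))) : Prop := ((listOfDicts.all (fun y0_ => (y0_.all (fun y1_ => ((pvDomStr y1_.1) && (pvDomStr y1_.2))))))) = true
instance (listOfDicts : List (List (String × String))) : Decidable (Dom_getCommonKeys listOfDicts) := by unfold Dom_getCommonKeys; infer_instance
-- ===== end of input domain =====

-- B builds one running intersection of key sets, then filters the first dict's keys; simpler than A's nested per-key scan.

-- ===== PORT A =====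
-- A: for each key of listOfDicts[0], an inner loop over all dicts sets `exists` to False
-- on any failing lookup; keys passing are appended.
def getCommonKeys (listOfDicts : List (List (String × String))) : List String :=
  match listOfDicts with
  | [] => []   -- unreachable under Pre_ (Python raises IndexError on [])
  | d0 :: _ =>
    (PySem.List.dedup (d0.map Prod.fst)).foldl
      (fun retList c =>
        let ex := listOfDicts.foldl
          (fun ex dic => if (dic.lookup c).isSome then ex else false) true
        if ex then retList ++ [c] else retList) []

-- ===== PORT B =====
def getCommonKeys_alt (listOfDicts : List (List (String × String))) : List String :=
  match listOfDicts with
  | [] => []   -- unreachable under Pre_ (Python raises IndexError on [])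
  | d0 :: rest =>
    let common := rest.foldl
      (fun s dic => PySem.Set.inter s (PySem.Set.ofList (dic.map Prod.fst)))
      (PySem.Set.ofList (d0.map Prod.fst))
    (PySem.List.dedup (d0.map Prod.fst)).filter (fun k => PySem.Set.contains common k)

-- ===== PRECONDITION & SPEC =====
-- Pre_ excludes only the empty list, on which Python A raises IndexError (listOfDicts[0]).
def Pre_getCommonKeys (listOfDicts : List (List (String × String))) : Prop := listOfDicts ≠ []
instance (listOfDicts : List (List (String × String))) : Decidable (Pre_getCommonKeys listOfDicts) := by unfold Pre_getCommonKeys; infer_instance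
def pvWitness_getCommonKeys : (List (List (String × String))) := [[("a", "1"), ("b", "2")], [("b", "3")]]

def Spec_getCommonKeys (listOfDicts : List (List (String × String))) (out : List String) : Prop := out = getCommonKeys_alt listOfDicts
instance (listOfDicts : List (List (String × String))) (out : List String) : Decidable (Spec_getCommonKeys listOfDicts out) := by unfold Spec_getCommonKeys; infer_instance

-- ===== CLAIM (what is proved, stated in full; the proofs are below) =====
def Claim_equal_getCommonKeys : Prop := ∀ (listOfDicts : List (List (String × String))), Dom_getCommonKeys listOfDicts → Pre_getCommonKeys listOfDicts → Spec_getCommonKeys listOfDicts (getCommonKeys listOfDicts)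

-- ===== LEMMAS AND PROOFS =====

-- A's inner loop is an `all`
theorem existsLoop_eq_all (c : String) (l : List (List (String × String))) :
    l.foldl (fun ex dic => if (dic.lookup c).isSome then ex else false) true
      = l.all (fun dic => (dic.lookup c).isSome) := by
  have gen : ∀ (l : List (List (String × String))) (b : Bool),
      l.foldl (fun ex dic => if (dic.lookup c).isSome then ex else false) b
        = (b && l.all (fun dic => (dic.lookup c).isSome)) := by
    intro l
    induction l with
    | nil => simp
    | cons d t ih =>
      intro b
      simp only [List.foldl_cons, List.all_cons, ih]
      by_cases h : (d.lookup c).isSome <;> simp [h]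
  simpa using gen l true

-- membership in B's running intersection
theorem mem_common (c : String) (rest : List (List (String × String)))
    (s : PySem.Set String) :
    (c ∈ rest.foldl
        (fun s dic => PySem.Set.inter s (PySem.Set.ofList (dic.map Prod.fst))) s)
      ↔ (c ∈ s ∧ ∀ dic ∈ rest, c ∈ dic.map Prod.fst) := by
  induction rest generalizing s with
  | nil => simp
  | cons d t ih =>
    simp only [List.foldl_cons, ih, PySem.Set.mem_inter, PySem.Set.mem_ofList,
      List.mem_cons]
    constructor
    · rintro ⟨⟨hs, hd⟩, ht⟩
      refine ⟨hs, fun dic h => ?_⟩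
      rcases h with rfl | h
      · exact hd
      · exact ht dic h
    · rintro ⟨hs, h⟩
      exact ⟨⟨hs, h d (Or.inl rfl)⟩, fun dic hm => h dic (Or.inr hm)⟩

theorem lookup_isSome_iff (c : String) (d : List (String × String)) :
    (d.lookup c).isSome = true ↔ c ∈ d.map Prod.fst := by
  induction d with
  | nil => simp
  | cons p t ih =>
    by_cases h : c = p.1
    · subst h; simp [List.lookup]
    · have hb : (c == p.1) = false := by simp [h]
      simp [List.lookup, hb, h]

-- ===== VERDICT (by name: the statement is the Claim_ definition above) =====
theorem getCommonKeys_spec : Claim_equal_getCommonKeys := by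
  intro l _ hpre
  unfold Spec_getCommonKeys getCommonKeys getCommonKeys_alt
  match l with
  | [] => exact absurd rfl hpre
  | d0 :: rest =>
    simp only
    rw [PySem.List.foldl_append_if]
    simp only [List.nil_append, List.map_id']
    apply List.filter_congr
    intro c hc
    have hc0 : c ∈ d0.map Prod.fst := (PySem.List.mem_dedup _ _).1 hc
    rw [existsLoop_eq_all]
    rw [Bool.eq_iff_iff]
    simp only [List.all_cons, Bool.and_eq_true, List.all_eq_true,
      PySem.Set.contains_iff, mem_common, PySem.Set.mem_ofList]
    constructor
    · rintro ⟨_, h⟩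
      exact ⟨hc0, fun dic hm => (lookup_isSome_iff c dic).1 (h dic hm)⟩
    · rintro ⟨_, h⟩
      exact ⟨(lookup_isSome_iff c d0).2 hc0,
        fun dic hm => (lookup_isSome_iff c dic).2 (h dic hm)⟩
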